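-- pv_equiv track=rewrite | github.com/michaelbennieUFL/ChineseCounterSpeech | labeling_questions/classifiers/base_classifier.py | preprocess_english_data
-- ===== SOURCE A (Python) =====
-- from typing import Union, List, Tuple, Dict
--
-- def preprocess_english_data(data: List[dict]) -> Dict[str, List[List[dict]]]:
--     """
--     Convert JSON list of dicts into multiple (X, y) pairs for different labels.
--
--     :param data: list of records from the JSON
--     :return: dict with keys corresponding to different label sets
--                  e.g. verification_timeline, evidence_quality, etc.
--                  Each value is a list [X_list, y_list]
--     """
--     processed_data = {
--         "promise_status": [[], []],
--         "evidence_status": [[], []],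
--         "evidence_quality": [[], []],
--         "verification_timeline": [[], []],
--     }
--
--     for record in data:
--         # Use the entire record as the X value
--         x_value = record["data"]
--
--         # Extract labels
--         promise_status = record.get("promise_status", "No")
--         evidence_status = record.get("evidence_status", "No")
--         verification_timeline = record.get("verification_timeline", "N/A")
--         evidence_quality = record.get("evidence_quality", "N/A")
--
--         # Process promise_status data
--         processed_data["promise_status"][0].append(x_value)
--         processed_data["promise_status"][1].append(promise_status)
--
--         if promise_status == "Yes":
--             # Process evidence_status data
--             processed_data["evidence_status"][0].append(x_value)
--             processed_data["evidence_status"][1].append(evidence_status)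
--
--             # Process evidence_quality data
--             if evidence_status == "Yes":  # Only relevant when evidence exists
--                 processed_data["evidence_quality"][0].append(x_value)
--                 processed_data["evidence_quality"][1].append(evidence_quality)
--
--             # Process verification_timeline data
--             processed_data["verification_timeline"][0].append(x_value)
--             processed_data["verification_timeline"][1].append(verification_timeline)
--
--     return processed_data
-- ===== SOURCE B (Python) =====
-- def preprocess_english_data(data):
--     """Filter-then-map decomposition: build each label's [X, y] lists by
--     comprehensions over progressively filtered record lists."""
--     yes = [r for r in data if r.get("promise_status", "No") == "Yes"]
--     ev_yes = [r for r in yes if r.get("evidence_status", "No") == "Yes"]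
--     return {
--         "promise_status": [[r["data"] for r in data],
--                            [r.get("promise_status", "No") for r in data]],
--         "evidence_status": [[r["data"] for r in yes],
--                             [r.get("evidence_status", "No") for r in yes]],
--         "evidence_quality": [[r["data"] for r in ev_yes],
--                              [r.get("evidence_quality", "N/A") for r in ev_yes]],
--         "verification_timeline": [[r["data"] for r in yes],
--                                   [r.get("verification_timeline", "N/A") for r in yes]],
--     }
-- ===== Notes on version B (the rewrite author's own statement) =====
-- stated objective: alternative
-- what changed: Replaces A's single branchy pass appending to four mutable accumulators with a filter-then-map decomposition: comprehensions over data, over the promise_status=='Yes' subset, and over its evidence_status=='Yes' subset build each label's [X, y] lists directly.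
import Mathlib
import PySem

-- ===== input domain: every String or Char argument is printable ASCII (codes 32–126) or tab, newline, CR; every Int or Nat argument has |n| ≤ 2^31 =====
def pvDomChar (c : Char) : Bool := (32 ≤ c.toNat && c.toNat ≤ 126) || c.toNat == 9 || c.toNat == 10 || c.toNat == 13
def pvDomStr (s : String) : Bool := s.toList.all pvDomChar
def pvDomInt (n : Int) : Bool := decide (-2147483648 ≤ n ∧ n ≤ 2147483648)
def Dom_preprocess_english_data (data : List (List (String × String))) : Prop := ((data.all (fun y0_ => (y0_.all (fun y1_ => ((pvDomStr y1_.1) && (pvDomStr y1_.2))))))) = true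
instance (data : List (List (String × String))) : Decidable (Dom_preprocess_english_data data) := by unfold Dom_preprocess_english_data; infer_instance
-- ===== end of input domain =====

-- B restructures A's single branchy accumulating pass into filter-then-map comprehensions (objective: alternative decomposition, same cost).
-- first-match lookup in an association-list record (Python dict lookup)
def pvFind? (r : List (String × String)) (k : String) : Option String :=
  (r.find? (fun p => p.1 == k)).map (·.2)

-- record.get(k, dflt)
def pvGetD (r : List (String × String)) (k : String) (dflt : String) : String :=
  (pvFind? r k).getD dflt

-- record["data"]; Pre_ guarantees the key is present, the default is never used inside Pre_
def pvData (r : List (String × String)) : String :=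
  (pvFind? r "data").getD ""

-- ===== PORT A =====
-- one pass over data, appending into eight accumulator lists (the dict's four [X, y] pairs)
def pvStepA (s : List String × List String × List String × List String ×
                 List String × List String × List String × List String)
    (r : List (String × String)) :
    List String × List String × List String × List String ×
    List String × List String × List String × List String :=
  let (psx, psy, esx, esy, eqx, eqy, vtx, vty) := s
  let x := pvData r
  let ps := pvGetD r "promise_status" "No"
  let es := pvGetD r "evidence_status" "No"
  let vt := pvGetD r "verification_timeline" "N/A"
  let eq := pvGetD r "evidence_quality" "N/A"
  let psx := psx ++ [x]
  let psy := psy ++ [ps]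
  if ps = "Yes" then
    let esx := esx ++ [x]
    let esy := esy ++ [es]
    let (eqx, eqy) := if es = "Yes" then (eqx ++ [x], eqy ++ [eq]) else (eqx, eqy)
    (psx, psy, esx, esy, eqx, eqy, vtx ++ [x], vty ++ [vt])
  else
    (psx, psy, esx, esy, eqx, eqy, vtx, vty)

def preprocess_english_data (data : List (List (String × String))) : List (String × List (List String)) :=
  let (psx, psy, esx, esy, eqx, eqy, vtx, vty) :=
    data.foldl pvStepA ([], [], [], [], [], [], [], [])
  [("promise_status", [psx, psy]),
   ("evidence_status", [esx, esy]),
   ("evidence_quality", [eqx, eqy]),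
   ("verification_timeline", [vtx, vty])]

-- ===== PORT B =====
def preprocess_english_data_alt (data : List (List (String × String))) : List (String × List (List String)) :=
  let yes := data.filter (fun r => pvGetD r "promise_status" "No" == "Yes")
  let evYes := yes.filter (fun r => pvGetD r "evidence_status" "No" == "Yes")
  [("promise_status", [data.map pvData, data.map (fun r => pvGetD r "promise_status" "No")]),
   ("evidence_status", [yes.map pvData, yes.map (fun r => pvGetD r "evidence_status" "No")]),
   ("evidence_quality", [evYes.map pvData, evYes.map (fun r => pvGetD r "evidence_quality" "N/A")]),
   ("verification_timeline", [yes.map pvData, yes.map (fun r => pvGetD r "verification_timeline" "N/A")])]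

-- ===== PRECONDITION & SPEC =====
-- Pre_ excludes exactly the inputs where A raises KeyError: a record without key "data".
def Pre_preprocess_english_data (data : List (List (String × String))) : Prop :=
  ∀ r ∈ data, (pvFind? r "data").isSome = true
instance (data : List (List (String × String))) : Decidable (Pre_preprocess_english_data data) := by
  unfold Pre_preprocess_english_data; infer_instance
def pvWitness_preprocess_english_data : (List (List (String × String))) :=
  [[("data", "x"), ("promise_status", "Yes")], [("data", "y")]]

def Spec_preprocess_english_data (data : List (List (String × String))) (out : List (String × List (List String))) : Prop := out = preprocess_english_data_alt data
instance (data : List (List (String × String))) (out : List (String × List (List String))) : Decidable (Spec_preprocess_english_data data out) := by unfold Spec_preprocess_english_data; infer_instance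

-- ===== CLAIM (what is proved, stated in full; the proofs are below) =====
def Claim_equal_preprocess_english_data : Prop := ∀ (data : List (List (String × String))), Dom_preprocess_english_data data → Pre_preprocess_english_data data → Spec_preprocess_english_data data (preprocess_english_data data)

-- ===== LEMMAS AND PROOFS =====

-- loop invariant: A's fold appends exactly B's filter/map lists to the accumulators
theorem pvFoldA_char (l : List (List (String × String)))
    (psx psy esx esy eqx eqy vtx vty : List String) :
    l.foldl pvStepA (psx, psy, esx, esy, eqx, eqy, vtx, vty) =
      (psx ++ l.map pvData,
       psy ++ l.map (fun r => pvGetD r "promise_status" "No"),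
       esx ++ (l.filter (fun r => pvGetD r "promise_status" "No" == "Yes")).map pvData,
       esy ++ (l.filter (fun r => pvGetD r "promise_status" "No" == "Yes")).map
                (fun r => pvGetD r "evidence_status" "No"),
       eqx ++ ((l.filter (fun r => pvGetD r "promise_status" "No" == "Yes")).filter
                (fun r => pvGetD r "evidence_status" "No" == "Yes")).map pvData,
       eqy ++ ((l.filter (fun r => pvGetD r "promise_status" "No" == "Yes")).filter
                (fun r => pvGetD r "evidence_status" "No" == "Yes")).map
                (fun r => pvGetD r "evidence_quality" "N/A"),
       vtx ++ (l.filter (fun r => pvGetD r "promise_status" "No" == "Yes")).map pvData,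
       vty ++ (l.filter (fun r => pvGetD r "promise_status" "No" == "Yes")).map
                (fun r => pvGetD r "verification_timeline" "N/A")) := by
  induction l generalizing psx psy esx esy eqx eqy vtx vty with
  | nil => simp
  | cons r t ih =>
    simp only [List.foldl_cons, List.map_cons, List.filter_cons]
    by_cases hps : pvGetD r "promise_status" "No" = "Yes"
    · by_cases hes : pvGetD r "evidence_status" "No" = "Yes"
      · simp [pvStepA, hps, hes, ih]
      · simp [pvStepA, hps, hes, ih]
    · simp [pvStepA, hps, ih]

-- ===== VERDICT (by name: the statement is the Claim_ definition above) =====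
theorem preprocess_english_data_spec : Claim_equal_preprocess_english_data := by
  intro data _ _
  unfold Spec_preprocess_english_data preprocess_english_data preprocess_english_data_alt
  rw [pvFoldA_char]
  simp
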